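-- pv_equiv track=rewrite | github.com/nickBes/favory | Scrapers/scrapper/spiders/process_data/device_id_detector.py | _detect_id
-- ===== SOURCE A (Python) =====
-- ASCII_MAX = 128
--
-- NON_MEANINGFULL_WORDS = set([
--     'pro',
--     'threadripper',
--     'embedded',
--     'ii',
--     'ultra'
-- ])
--
-- class DeviceIdBuilder:
--     def __init__(self) -> None:
--         self.id = ''
--     def add_word(self, word:str)->None:
--         # if the id contains previous words, we should add a space before adding the new word
--         if len(self.id)>0:
--             self.id += ' '
--         self.id += word
--
-- def word_contains_digits(word:str)->bool:
--     return any([c.isdigit() for c in word])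
--
-- def _detect_id(device_description:str)->str:
--     # sometimes the combination of hebrew and english makes it so that the parentheses
--     # move to the start of the string, so remove them from the string.
--     if device_description[0] == '(':
--         device_description = device_description[1:]
--
--     # remove all non-ascii chars
--     valid_chars = [c for c in device_description if ord(c)<ASCII_MAX]
--     device_description = ''.join(valid_chars)
--
--     # read all letters, digits, spaces and '-'s until we encounter any other character
--     letters_digits_spaces = ''
--     for c in device_description:
--         if c == ' ' or c == '-' or c.isalnum():
--             letters_digits_spaces+=c
--         else:
--             break
--
--     # the id is always a word that contains digits, and might span across multiple
--     # words. so we read all words until we encounter a word that contains both letters and digits,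
--     # and from there we only continue reading words that also contain boeth letters and digits.
--     found_first_id_word = False
--     id_builder = DeviceIdBuilder()
--     for word in letters_digits_spaces.split(' '):
--         if word in NON_MEANINGFULL_WORDS:
--             id_builder.add_word(word)
--             continue
--
--         cur_word_contains_digits = word_contains_digits(word)
--         if cur_word_contains_digits:
--             found_first_id_word = True
--
--         # if we have already encountered the first id word that contains digits, and we
--         # find a word that is non-id after it, then this word is probably not part of the id
--         if found_first_id_word and not cur_word_contains_digits:
--             break
--
--         id_builder.add_word(word)
--
--     result = id_builder.id
--
--     # in the ivory website they write the nvidia gpus with the 'Ti' right after the number,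
--     # without a space separating them, but in notebookcheck.com there is a space between the
--     # number and the 'Ti', so we should add it.
--     if result.endswith('Ti'):
--         result = result[:-2] + ' Ti'
--
--     return result
-- ===== SOURCE B (Python) =====
-- NON_MEANINGFULL_WORDS = set([
--     'pro',
--     'threadripper',
--     'embedded',
--     'ii',
--     'ultra'
-- ])
--
-- def _word_has_digit(word):
--     for c in word:
--         if c.isdigit():
--             return True
--     return False
--
-- def _detect_id(device_description):
--     # drop a leading parenthesis (hebrew/english mixing artifact)
--     if device_description[0] == '(':
--         device_description = device_description[1:]
--
--     # keep only ascii characters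
--     s = ''.join(c for c in device_description if ord(c) < 128)
--
--     # length of the leading run of letters, digits, spaces and '-'s
--     n = 0
--     while n < len(s) and (s[n] == ' ' or s[n] == '-' or s[n].isalnum()):
--         n += 1
--
--     words = s[:n].split(' ')
--
--     # index of the first word containing a digit (len(words) if none)
--     i = next((k for k, w in enumerate(words) if _word_has_digit(w)), len(words))
--
--     # keep everything before that word, then the run of digit-bearing or
--     # non-meaningful words starting there
--     kept = words[:i]
--     for w in words[i:]:
--         if _word_has_digit(w) or w in NON_MEANINGFULL_WORDS:
--             kept.append(w)
--         else:
--             break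
--
--     # empty words at the front (from leading spaces) contribute nothing
--     while kept and kept[0] == '':
--         kept.pop(0)
--
--     result = ' '.join(kept)
--
--     # normalise 'Ti' glued to the number: insert the space notebookcheck uses
--     if result.endswith('Ti'):
--         result = result[:-2] + ' Ti'
--
--     return result
-- ===== Notes on version B (the rewrite author's own statement) =====
-- stated objective: simpler
-- what changed: Replaces A's flag-and-break builder loop (DeviceIdBuilder with found_first_id_word state) by finding the index of the first digit-bearing word, keeping the words before it plus the bounded run of digit/non-meaningful words from it, and a single ' '.join after dropping leading empty words; the char-accumulating prefix loop becomes an index scan plus slice.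
import Mathlib
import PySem

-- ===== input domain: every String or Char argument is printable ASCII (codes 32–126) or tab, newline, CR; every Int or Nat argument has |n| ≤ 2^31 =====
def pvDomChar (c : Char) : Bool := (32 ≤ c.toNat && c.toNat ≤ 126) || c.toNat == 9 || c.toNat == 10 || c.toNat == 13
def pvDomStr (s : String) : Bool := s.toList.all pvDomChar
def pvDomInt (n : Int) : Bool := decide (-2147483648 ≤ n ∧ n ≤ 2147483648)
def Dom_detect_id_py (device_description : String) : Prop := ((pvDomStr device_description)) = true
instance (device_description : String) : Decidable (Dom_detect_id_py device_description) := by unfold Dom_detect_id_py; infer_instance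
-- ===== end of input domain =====

-- B replaces A's flag-and-break builder loop by a find-first-digit-word index, a bounded
-- forward run, and a single ' '.join (objective: simpler decomposition; return value only).

-- shared constants/helpers both Pythons define identically
def pvNMW : List (List Char) := [['p','r','o'], ['t','h','r','e','a','d','r','i','p','p','e','r'],
  ['e','m','b','e','d','d','e','d'], ['i','i'], ['u','l','t','r','a']]

def pvHasDigit (w : List Char) : Bool := w.any PySem.Chars.isdigit

-- c == ' ' or c == '-' or c.isalnum()
def pvOkChar (c : Char) : Bool := c == ' ' || c == '-' || PySem.Chars.isalnum c

-- ===== PORT A =====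
-- the letters_digits_spaces accumulation loop (breaks at the first bad char)
def pvPrefA : List Char → List Char
  | [] => []
  | c :: cs => if pvOkChar c then c :: pvPrefA cs else []

-- DeviceIdBuilder.add_word
def pvAddWord (id w : List Char) : List Char :=
  if id.length > 0 then id ++ ' ' :: w else id ++ w

-- the word loop with the found_first_id_word flag and the break
def pvLoopA : List (List Char) → Bool → List Char → List Char
  | [], _, id => id
  | w :: ws, found, id =>
    if pvNMW.contains w then pvLoopA ws found (pvAddWord id w)
    else
      let d := pvHasDigit w
      let found' := d || found
      if found' && !d then id
      else pvLoopA ws found' (pvAddWord id w)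

def detect_id_py (device_description : String) : String :=
  let s0 := device_description.toList
  -- if device_description[0] == '(' (IndexError on "" is excluded by Pre_)
  let s1 := if PySem.List.pyGet? s0 0 = some '(' then PySem.List.slice s0 (some 1) none else s0
  let s2 := s1.filter (fun c => c.toNat < 128)
  let pref := pvPrefA s2
  let res := pvLoopA (PySem.Chars.splitOn pref [' ']) false []
  let res := if PySem.Chars.endswith res ['T','i']
             then PySem.List.slice res none (some (-2)) ++ [' ', 'T', 'i'] else res
  String.ofList res

-- ===== PORT B =====
-- length of the leading run of good chars (B's index-advancing while loop)
def pvPrefLen : List Char → Nat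
  | [] => 0
  | c :: cs => if pvOkChar c then pvPrefLen cs + 1 else 0

-- the bounded run from the first digit word on
def pvRunB : List (List Char) → List (List Char)
  | [] => []
  | w :: ws => if pvHasDigit w || pvNMW.contains w then w :: pvRunB ws else []

def detect_id_py_alt (device_description : String) : String :=
  let s0 := device_description.toList
  let s1 := if PySem.List.pyGet? s0 0 = some '(' then PySem.List.slice s0 (some 1) none else s0
  let s2 := s1.filter (fun c => c.toNat < 128)
  let n := pvPrefLen s2
  let words := PySem.Chars.splitOn (PySem.List.slice s2 none (some (n : Int))) [' ']
  let i := words.findIdx pvHasDigit    -- next(..., len(words))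
  let kept := words.take i ++ pvRunB (words.drop i)
  let kept := kept.dropWhile (fun w => w == ([] : List Char))   -- pop leading '' words
  let res := PySem.Chars.join [' '] kept
  let res := if PySem.Chars.endswith res ['T','i']
             then PySem.List.slice res none (some (-2)) ++ [' ', 'T', 'i'] else res
  String.ofList res

-- ===== PRECONDITION & SPEC =====
-- Pre_ excludes only the empty string, on which A's device_description[0] raises IndexError.
def Pre_detect_id_py (device_description : String) : Prop := device_description ≠ ""
instance (device_description : String) : Decidable (Pre_detect_id_py device_description) := by
  unfold Pre_detect_id_py; infer_instance

def pvWitness_detect_id_py : String := "Ryzen 7 5800H, 8 cores"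

def Spec_detect_id_py (device_description : String) (out : String) : Prop :=
  out = detect_id_py_alt device_description
instance (device_description : String) (out : String) : Decidable (Spec_detect_id_py device_description out) := by
  unfold Spec_detect_id_py; infer_instance

-- ===== CLAIM (what is proved, stated in full; the proofs are below) =====
def Claim_equal_detect_id_py : Prop := ∀ (device_description : String),
  Dom_detect_id_py device_description → Pre_detect_id_py device_description →
  Spec_detect_id_py device_description (detect_id_py device_description)

-- ===== LEMMAS AND PROOFS =====

-- the non-meaningful words contain no digits
lemma pvNMW_no_digit (w : List Char) (h : w ∈ pvNMW) : pvHasDigit w = false := by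
  fin_cases h <;> decide

-- the char-accumulating prefix loop is the take of the counted prefix length
lemma pvPrefA_eq (s : List Char) : pvPrefA s = s.take (pvPrefLen s) := by
  induction s with
  | nil => rfl
  | cons c cs ih => by_cases h : pvOkChar c = true <;> simp [pvPrefA, pvPrefLen, h, ih]

-- once the id is nonempty, the builder appends ' ' ++ word for every remaining word
lemma pvFoldl_add_nonempty (l : List (List Char)) (id : List Char) (h : id ≠ []) :
    List.foldl pvAddWord id l = id ++ l.flatMap (fun w => ' ' :: w) := by
  induction l generalizing id with
  | nil => simp
  | cons w ws ih =>
      have hadd : pvAddWord id w = id ++ ' ' :: w := by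
        simp [pvAddWord, List.length_pos_iff.mpr h]
      simp only [List.foldl_cons, hadd, List.flatMap_cons]
      rw [ih _ (by simp)]
      simp

-- join with a single space, in flatMap form
lemma pvJoin_cons (w : List Char) (l : List (List Char)) :
    PySem.Chars.join [' '] (w :: l) = w ++ l.flatMap (fun w => ' ' :: w) := by
  induction l generalizing w with
  | nil => simp [PySem.Chars.join_singleton]
  | cons v vs ih => rw [PySem.Chars.join_cons_cons, ih v]; simp

-- the builder fold equals dropping leading empty words then joining with ' '
lemma pvFoldl_add_eq_join (l : List (List Char)) :
    List.foldl pvAddWord [] l =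
      PySem.Chars.join [' '] (l.dropWhile (fun w => w == ([] : List Char))) := by
  induction l with
  | nil => rfl
  | cons w ws ih =>
      by_cases h : w = []
      · subst h
        simpa [pvAddWord] using ih
      · rw [List.dropWhile_cons_of_neg (by simpa using h)]
        rw [pvJoin_cons, List.foldl_cons]
        have : pvAddWord [] w = w := by simp [pvAddWord]
        rw [this, pvFoldl_add_nonempty ws w h]

-- A's flag loop selects exactly: everything before the first digit word, then B's bounded run
lemma pvLoopA_found (ws : List (List Char)) (id : List Char) :
    pvLoopA ws true id = List.foldl pvAddWord id (pvRunB ws) := by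
  induction ws generalizing id with
  | nil => rfl
  | cons w l ih =>
      by_cases hn : w ∈ pvNMW
      · simp [pvLoopA, pvRunB, hn, ih]
      · by_cases hd : pvHasDigit w = true
        · simp [pvLoopA, pvRunB, hn, hd, ih]
        · simp only [Bool.not_eq_true] at hd
          simp [pvLoopA, pvRunB, hn, hd]

lemma pvLoopA_eq (ws : List (List Char)) (id : List Char) :
    pvLoopA ws false id =
      List.foldl pvAddWord id
        (ws.take (ws.findIdx pvHasDigit) ++ pvRunB (ws.drop (ws.findIdx pvHasDigit))) := by
  induction ws generalizing id with
  | nil => rfl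
  | cons w l ih =>
      by_cases hd : pvHasDigit w = true
      · have hn : ¬ w ∈ pvNMW := fun h => by simpa [hd] using pvNMW_no_digit w h
        have hi : (w :: l).findIdx pvHasDigit = 0 := by rw [List.findIdx_cons, hd]; rfl
        rw [hi]
        simp only [List.take_zero, List.drop_zero, List.nil_append]
        simp only [pvLoopA]
        simp only [List.contains_eq_mem, decide_eq_true_eq] at *
        simp [hn, hd, pvLoopA_found, pvRunB]
      · simp only [Bool.not_eq_true] at hd
        have hi : (w :: l).findIdx pvHasDigit = l.findIdx pvHasDigit + 1 := by
          rw [List.findIdx_cons, hd]; rfl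
        by_cases hn : w ∈ pvNMW
        · simp [pvLoopA, hn, ih, hi]
        · simp [pvLoopA, hn, hd, ih, hi]

lemma pvSlice_to_take (s : List Char) (n : Nat) :
    PySem.List.slice s none (some (n : Int)) = s.take n := by
  simp [pysem]

-- ===== VERDICT (by name: the statement is the Claim_ definition above) =====
theorem detect_id_py_spec : Claim_equal_detect_id_py := by
  intro s _ _
  unfold Spec_detect_id_py detect_id_py detect_id_py_alt
  simp only [pvPrefA_eq, pvLoopA_eq, pvFoldl_add_eq_join, pvSlice_to_take]
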